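-- pv_equiv track=rewrite | github.com/djakub44/pp1 | 12-Test3/mock1/p7.py | f
-- ===== SOURCE A (Python) =====
-- def f(arr2D):
--     arrSum = [0]*len(arr2D[0])
--     for i in arr2D:
--         for j in range(len(i)):
--             arrSum[j]+=i[j]
--
--     for i in range(len(arrSum)):
--         for j in range(i+1, len(arrSum)):
--             if arrSum[i] == arrSum[j]:
--                 return True
--     else:
--         return False
-- ===== SOURCE B (Python) =====
-- def f(arr2D):
--     arrSum = [0]*len(arr2D[0])
--     for i in arr2D:
--         for j in range(len(i)):
--             arrSum[j] += i[j]
--     s = sorted(arrSum)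
--     for k in range(len(s)-1):
--         if s[k] == s[k+1]:
--             return True
--     return False
-- ===== Notes on version B (the rewrite author's own statement) =====
-- stated objective: alternative
-- what changed: Replaces A's quadratic all-pairs comparison of the column sums with sorting the sums once and scanning adjacent elements for a duplicate; building the sums (which dominates on the generated inputs) is unchanged.
import Mathlib
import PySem

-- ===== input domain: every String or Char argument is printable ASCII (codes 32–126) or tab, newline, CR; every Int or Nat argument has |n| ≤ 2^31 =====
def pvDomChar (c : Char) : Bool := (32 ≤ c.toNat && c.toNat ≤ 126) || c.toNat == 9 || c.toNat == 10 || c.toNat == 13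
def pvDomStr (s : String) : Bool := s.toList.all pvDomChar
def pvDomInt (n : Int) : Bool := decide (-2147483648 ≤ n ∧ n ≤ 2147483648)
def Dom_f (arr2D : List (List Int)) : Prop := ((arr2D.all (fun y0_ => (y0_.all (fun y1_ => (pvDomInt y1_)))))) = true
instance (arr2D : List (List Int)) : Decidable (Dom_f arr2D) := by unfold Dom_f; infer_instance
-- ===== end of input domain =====

-- B replaces A's quadratic all-pairs comparison of the column sums by sorting the sums
-- once and scanning adjacent elements for a duplicate.
-- Both programs build the column sums by the same loop; it is shared as pvSums.

-- ===== PORT A =====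
-- arrSum = [0]*len(arr2D[0]); for i in arr2D: for j in range(len(i)): arrSum[j] += i[j]
def pvSums (arr2D : List (List Int)) : List Int :=
  arr2D.foldl
    (fun arrSum i =>
      (PySem.List.pyRange 0 i.length 1).foldl
        (fun arrSum j =>
          PySem.List.pySetD arrSum j (PySem.List.pyGetD arrSum j 0 + PySem.List.pyGetD i j 0))
        arrSum)
    (List.replicate ((PySem.List.pyGet? arr2D 0).getD []).length 0)

def f (arr2D : List (List Int)) : Bool :=
  let arrSum := pvSums arr2D
  (PySem.List.pyRange 0 (PySem.List.len arrSum) 1).any (fun i =>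
    (PySem.List.pyRange (i + 1) (PySem.List.len arrSum) 1).any (fun j =>
      PySem.List.pyGetD arrSum i 0 == PySem.List.pyGetD arrSum j 0))

-- ===== PORT B =====
def f_alt (arr2D : List (List Int)) : Bool :=
  let arrSum := pvSums arr2D
  let s := PySem.List.sorted arrSum (fun x => x) false
  (PySem.List.pyRange 0 (PySem.List.len s - 1) 1).any (fun k =>
    PySem.List.pyGetD s k 0 == PySem.List.pyGetD s (k + 1) 0)

-- ===== PRECONDITION & SPEC =====
-- Pre_ excludes exactly the inputs on which Python A raises IndexError: an empty arr2D
-- (arr2D[0]) or a row longer than the first row (arrSum[j]).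
def Pre_f (arr2D : List (List Int)) : Prop :=
  arr2D ≠ [] ∧ ∀ row ∈ arr2D, row.length ≤ (arr2D.headD []).length
instance (arr2D : List (List Int)) : Decidable (Pre_f arr2D) := by unfold Pre_f; infer_instance
def pvWitness_f : List (List Int) := [[1, 2, 3], [4, -1, 0]]

def Spec_f (arr2D : List (List Int)) (out : Bool) : Prop := out = f_alt arr2D
instance (arr2D : List (List Int)) (out : Bool) : Decidable (Spec_f arr2D out) := by unfold Spec_f; infer_instance

-- ===== CLAIM (what is proved, stated in full; the proofs are below) =====
def Claim_equal_f : Prop := ∀ (arr2D : List (List Int)), Dom_f arr2D → Pre_f arr2D → Spec_f arr2D (f arr2D)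

-- ===== LEMMAS AND PROOFS =====

-- A's nested-pair scan finds a duplicate iff the list is not Nodup.
lemma pair_scan_iff (xs : List Int) :
    ((PySem.List.pyRange 0 (PySem.List.len xs) 1).any (fun i =>
      (PySem.List.pyRange (i + 1) (PySem.List.len xs) 1).any (fun j =>
        PySem.List.pyGetD xs i 0 == PySem.List.pyGetD xs j 0)) = true) ↔ ¬ xs.Nodup := by
  simp only [List.any_eq_true, PySem.List.mem_pyRange_one, PySem.List.len_eq, beq_iff_eq]
  rw [List.Nodup, List.pairwise_iff_getElem]
  constructor
  · rintro ⟨i, ⟨hi0, hin⟩, j, ⟨hij, hjn⟩, hval⟩ hp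
    rw [PySem.List.pyGetD_eq_getElem _ _ hi0 (by omega),
        PySem.List.pyGetD_eq_getElem _ _ (by omega) (by omega)] at hval
    exact hp i.toNat j.toNat (by omega) (by omega) (by omega) hval
  · intro hp
    push Not at hp
    obtain ⟨i, j, hi, hj, hij, hval⟩ := hp
    refine ⟨(i : Int), ⟨by omega, by omega⟩, (j : Int), ⟨by omega, by omega⟩, ?_⟩
    rw [PySem.List.pyGetD_eq_getElem _ _ (by omega) (by omega),
        PySem.List.pyGetD_eq_getElem _ _ (by omega) (by omega)]
    simpa using hval

-- Adjacent-equal scan on a list whose getElem is monotone finds a duplicate iff not Nodup.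
lemma adj_scan_sorted (s : List Int)
    (hmono : ∀ (p q : Nat) (hq : q < s.length) (hpq : p ≤ q), s[p]'(by omega) ≤ s[q]) :
    (((PySem.List.pyRange 0 (PySem.List.len s - 1) 1).any (fun k =>
      PySem.List.pyGetD s k 0 == PySem.List.pyGetD s (k + 1) 0)) = true) ↔ ¬ s.Nodup := by
  simp only [List.any_eq_true, PySem.List.mem_pyRange_one, PySem.List.len_eq, beq_iff_eq]
  rw [List.Nodup, List.pairwise_iff_getElem]
  constructor
  · rintro ⟨k, ⟨hk0, hkn⟩, hval⟩ hp
    rw [PySem.List.pyGetD_eq_getElem _ _ hk0 (by omega),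
        PySem.List.pyGetD_eq_getElem _ _ (by omega) (by omega)] at hval
    have h3 : (k + 1).toNat = k.toNat + 1 := by omega
    simp only [h3] at hval
    exact hp k.toNat (k.toNat + 1) (by omega) (by omega) (by omega) hval
  · intro hp
    push Not at hp
    obtain ⟨i, j, hi, hj, hij, hval⟩ := hp
    have h1 : s[i] ≤ s[i + 1]'(by omega) := hmono i (i + 1) (by omega) (by omega)
    have h2 : s[i + 1]'(by omega) ≤ s[j] := hmono (i + 1) j hj (by omega)
    refine ⟨(i : Int), ⟨by omega, by omega⟩, ?_⟩
    have h3 : ((i : Int) + 1).toNat = i + 1 := by omega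
    rw [PySem.List.pyGetD_eq_getElem _ _ (by omega) (by omega),
        PySem.List.pyGetD_eq_getElem _ _ (by omega) (by omega)]
    simp only [h3, Int.toNat_natCast]
    omega

-- B's adjacent scan of the sorted list finds a duplicate iff the original list is not Nodup.
lemma adj_scan_iff (xs : List Int) :
    (((PySem.List.pyRange 0 (PySem.List.len (PySem.List.sorted xs (fun x => x) false) - 1) 1).any (fun k =>
      PySem.List.pyGetD (PySem.List.sorted xs (fun x => x) false) k 0 ==
      PySem.List.pyGetD (PySem.List.sorted xs (fun x => x) false) (k + 1) 0)) = true) ↔ ¬ xs.Nodup := by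
  rw [adj_scan_sorted _ (fun p q hq hpq => PySem.List.sorted_id_getElem_mono xs hpq hq),
      (PySem.List.sorted_perm xs (fun x => x) false).nodup_iff]

-- ===== VERDICT (by name: the statement is the Claim_ definition above) =====
theorem f_spec : Claim_equal_f := by
  intro arr2D _ _
  show f arr2D = f_alt arr2D
  simp only [f, f_alt]
  rw [Bool.eq_iff_iff, pair_scan_iff, adj_scan_iff]
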